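-- pv_equiv track=rewrite | github.com/Norwegian-Forest-Cat/Backjoon | 프로그래머스/lv0/120891. 369게임/369게임.py | solution
-- ===== SOURCE A (Python) =====
-- def solution(order):
--     answer = 0
--     clap = ['3', '6', '9']
--     order = list(str(order))
--     for i in range(len(order)):
--         if order[i] in clap:
--             answer += 1
--     return answer
-- ===== SOURCE B (Python) =====
-- def solution(order):
--     # Arithmetic digit extraction: no string conversion at all.
--     n = -order if order < 0 else order
--     answer = 0
--     while n > 0:
--         n, d = divmod(n, 10)
--         if d == 3 or d == 6 or d == 9:
--             answer += 1
--     return answer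
-- ===== Notes on version B (the rewrite author's own statement) =====
-- stated objective: alternative
-- what changed: Replaces A's string conversion and per-character membership scan by a purely arithmetic divmod loop extracting decimal digits of |order| and counting those equal to 3, 6 or 9.
import Mathlib
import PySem

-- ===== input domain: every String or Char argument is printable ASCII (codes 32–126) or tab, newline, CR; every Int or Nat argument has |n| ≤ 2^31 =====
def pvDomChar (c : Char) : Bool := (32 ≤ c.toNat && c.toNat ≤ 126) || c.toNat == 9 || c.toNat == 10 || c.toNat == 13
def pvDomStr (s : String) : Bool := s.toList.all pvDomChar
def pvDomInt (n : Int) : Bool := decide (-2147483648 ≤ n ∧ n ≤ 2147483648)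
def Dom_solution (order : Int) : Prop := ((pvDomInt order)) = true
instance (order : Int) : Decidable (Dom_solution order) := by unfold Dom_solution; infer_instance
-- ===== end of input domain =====

-- B drops the string conversion and counts 3/6/9 digits by an arithmetic divmod loop on |order| (alternative algorithm).

-- ===== PORT A =====
def solution (order : Int) : Int :=
  let answer : Int := 0
  let clap : List Char := ['3', '6', '9']
  let orderL : List Char := (PySem.Int.toStr order).toList
  (PySem.List.pyRange 0 (PySem.List.len orderL) 1).foldl
    (fun acc i => if clap.contains (PySem.List.pyGetD orderL i ' ') then acc + 1 else acc)
    answer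

-- ===== PORT B =====
-- the 'while n > 0: n, d = divmod(n, 10); …' loop as structural recursion on n
def solClapLoop (n : Nat) (answer : Int) : Int :=
  if h : n = 0 then answer
  else
    let n' := n / 10
    let d := n % 10
    solClapLoop n' (if d = 3 ∨ d = 6 ∨ d = 9 then answer + 1 else answer)
termination_by n
decreasing_by exact Nat.div_lt_self (Nat.pos_of_ne_zero h) (by omega)

def solution_alt (order : Int) : Int :=
  let n : Int := if order < 0 then -order else order
  solClapLoop n.toNat 0

-- ===== PRECONDITION & SPEC =====
def Spec_solution (order : Int) (out : Int) : Prop := out = solution_alt order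
instance (order : Int) (out : Int) : Decidable (Spec_solution order out) := by unfold Spec_solution; infer_instance

-- ===== CLAIM (what is proved, stated in full; the proofs are below) =====
def Claim_equal_solution : Prop := ∀ (order : Int), Dom_solution order → Spec_solution order (solution order)

-- ===== LEMMAS AND PROOFS =====

def clapChar (c : Char) : Bool := (['3', '6', '9'] : List Char).contains c

-- digit list of n built front-to-back, mirroring Nat.toDigitsCore without the accumulator
def myDig (n : Nat) : List Char :=
  if h : n / 10 = 0 then [(n % 10).digitChar]
  else myDig (n / 10) ++ [(n % 10).digitChar]
termination_by n
decreasing_by exact Nat.div_lt_self (by omega) (by omega)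

lemma toDigitsCore_eq_myDig : ∀ (fuel n : Nat) (ds : List Char), n < fuel →
    Nat.toDigitsCore 10 fuel n ds = myDig n ++ ds := by
  intro fuel
  induction fuel with
  | zero => intro n ds h; omega
  | succ f ih =>
      intro n ds h
      rw [Nat.toDigitsCore]
      by_cases h10 : n / 10 = 0
      · simp only [h10, if_true]
        rw [myDig, dif_pos h10]
        rfl
      · simp only [h10, if_false]
        have hn0 : n ≠ 0 := by intro h0; subst h0; simp at h10
        have hlt : n / 10 < f := by
          have := Nat.div_lt_self (Nat.pos_of_ne_zero hn0) (by omega : 1 < 10)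
          omega
        rw [ih (n / 10) _ hlt]
        conv_rhs => rw [myDig, dif_neg h10]
        simp [List.append_assoc]

lemma toDigits_eq_myDig (n : Nat) : Nat.toDigits 10 n = myDig n := by
  rw [Nat.toDigits, toDigitsCore_eq_myDig (n + 1) n [] (by omega), List.append_nil]

lemma clapChar_digitChar (d : Nat) (hd : d < 10) :
    clapChar d.digitChar = decide (d = 3 ∨ d = 6 ∨ d = 9) := by
  interval_cases d <;> decide

lemma solClapLoop_add : ∀ (n : Nat) (a : Int), solClapLoop n a = a + solClapLoop n 0 := by
  intro n
  induction n using Nat.strong_induction_on with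
  | _ n ih =>
    intro a
    by_cases h : n = 0
    · subst h; simp [solClapLoop]
    · have hlt : n / 10 < n := Nat.div_lt_self (Nat.pos_of_ne_zero h) (by omega)
      rw [solClapLoop, dif_neg h]
      conv_rhs => rw [solClapLoop, dif_neg h]
      rw [ih _ hlt, ih _ hlt (if n % 10 = 3 ∨ n % 10 = 6 ∨ n % 10 = 9 then (0:Int) + 1 else 0)]
      split_ifs <;> ring

lemma countP_myDig (n : Nat) :
    ((myDig n).countP clapChar : Int) = solClapLoop n 0 := by
  induction n using Nat.strong_induction_on with
  | _ n ih =>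
    by_cases h0 : n = 0
    · subst h0; rw [myDig, solClapLoop]; decide
    · by_cases h10 : n / 10 = 0
      · rw [myDig, dif_pos h10, solClapLoop, dif_neg h0, h10,
          List.countP_singleton, clapChar_digitChar _ (by omega)]
        by_cases hc : n % 10 = 3 ∨ n % 10 = 6 ∨ n % 10 = 9 <;>
          simp [hc, solClapLoop]
      · have hlt : n / 10 < n := Nat.div_lt_self (Nat.pos_of_ne_zero h0) (by omega)
        rw [myDig, dif_neg h10, List.countP_append, List.countP_singleton,
          clapChar_digitChar _ (by omega)]
        conv_rhs => rw [solClapLoop, dif_neg h0]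
        rw [solClapLoop_add]
        push_cast
        rw [ih _ hlt]
        by_cases hc : n % 10 = 3 ∨ n % 10 = 6 ∨ n % 10 = 9 <;> [skip; skip] <;> simp [hc]
        ring

lemma countP_toChars (order : Int) :
    (((PySem.Int.toChars order).countP clapChar : Nat) : Int)
      = solClapLoop order.natAbs 0 := by
  rw [PySem.Int.toChars]
  split_ifs with hneg
  · rw [List.countP_cons]
    have : clapChar '-' = false := by decide
    rw [this, toDigits_eq_myDig]
    simpa using countP_myDig order.natAbs
  · rw [toDigits_eq_myDig]
    have : order.toNat = order.natAbs := by omega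
    rw [this]
    exact countP_myDig order.natAbs

-- ===== VERDICT (by name: the statement is the Claim_ definition above) =====
theorem solution_spec : Claim_equal_solution := by
  intro order _
  unfold Spec_solution solution solution_alt
  set cs : List Char := (PySem.Int.toStr order).toList with hcs
  rw [PySem.List.foldl_pyRange_pyGetD cs ' '
    (fun acc ch => if (['3','6','9'] : List Char).contains ch then acc + 1 else acc) 0 (by omega)]
  simp only [Int.toNat_zero, List.drop_zero]
  rw [PySem.List.foldl_if_add_one]
  have hcs' : cs = PySem.Int.toChars order := by
    rw [hcs, PySem.Int.toList_toStr]
  rw [hcs']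
  have h1 : ((PySem.Int.toChars order).countP (fun ch => (['3','6','9'] : List Char).contains ch))
      = (PySem.Int.toChars order).countP clapChar := by
    rfl
  have habs : (if order < 0 then -order else order).toNat = order.natAbs := by
    split_ifs <;> omega
  rw [h1, habs, ← countP_toChars order]
  omega
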